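-- pv_equiv track=rewrite | github.com/shraddhapiparia/blockbased-genotype-embedding-analysis | scripts/archive/08_block_embedding_umap_analysis.py | get_covars
-- ===== SOURCE A (Python) =====
-- PC_COLS = [f"PC{i}" for i in range(1, 11)]
--
-- def get_covars(pheno: str, available_cols):
--     covars = PC_COLS.copy()
--
--     if pheno == "age":
--         covars += ["gender_num"]
--     elif pheno == "BMI":
--         covars += ["gender_num"]
--     elif pheno == "G19B":
--         covars += ["gender_num"]
--     elif pheno == "log10eos":
--         covars += ["age", "gender_num"]
--     elif pheno == "pctpred_fev1_pre_BD":
--         covars += ["gender_num", "smkexp_current"]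
--     elif pheno in ["Hospitalized_Asthma_Last_Yr", "G20D"]:
--         covars += ["age", "gender_num", "smkexp_current"]
--     elif pheno == "smkexp_current":
--         covars += ["age", "gender_num"]
--
--     return [c for c in covars if c in available_cols]
-- ===== SOURCE B (Python) =====
-- PC_COLS = [f"PC{i}" for i in range(1, 11)]
--
-- # Inverted index: for each extra covariate, the phenotypes that require it.
-- # Every extra list in the spec is a subsequence of this canonical order,
-- # so emitting the extras in this fixed order reproduces the exact output order.
-- _ORDERED_EXTRAS = ("age", "gender_num", "smkexp_current")
-- _NEEDED_BY = {
--     "age": ("log10eos", "Hospitalized_Asthma_Last_Yr", "G20D", "smkexp_current"),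
--     "gender_num": ("age", "BMI", "G19B", "log10eos", "pctpred_fev1_pre_BD",
--                    "Hospitalized_Asthma_Last_Yr", "G20D", "smkexp_current"),
--     "smkexp_current": ("pctpred_fev1_pre_BD", "Hospitalized_Asthma_Last_Yr", "G20D"),
-- }
--
-- def get_covars(pheno: str, available_cols):
--     out = [pc for pc in PC_COLS if pc in available_cols]
--     for cov in _ORDERED_EXTRAS:
--         if pheno in _NEEDED_BY[cov] and cov in available_cols:
--             out.append(cov)
--     return out
-- ===== Notes on version B (the rewrite author's own statement) =====
-- stated objective: alternative
-- what changed: Inverts the mapping: instead of building a pheno-specific candidate list via an if/elif chain and then filtering it, B emits the always-present PC columns first and then decides, for each extra covariate in the fixed canonical order (age, gender_num, smkexp_current), whether the given pheno is in that covariate's inverted needed-by index and the covariate is available; correct because every extra list in A is a subsequence of that canonical order.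
import Mathlib
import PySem

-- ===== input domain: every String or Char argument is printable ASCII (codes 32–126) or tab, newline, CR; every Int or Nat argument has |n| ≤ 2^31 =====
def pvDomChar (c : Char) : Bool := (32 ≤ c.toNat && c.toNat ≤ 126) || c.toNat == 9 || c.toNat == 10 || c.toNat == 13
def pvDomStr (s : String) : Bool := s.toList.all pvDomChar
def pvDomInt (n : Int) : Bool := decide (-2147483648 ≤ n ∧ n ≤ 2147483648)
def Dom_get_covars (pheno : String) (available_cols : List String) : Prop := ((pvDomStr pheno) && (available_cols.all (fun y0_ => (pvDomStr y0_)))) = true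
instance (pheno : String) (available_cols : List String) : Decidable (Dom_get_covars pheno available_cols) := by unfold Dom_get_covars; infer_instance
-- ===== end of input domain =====

-- B inverts the mapping: PC columns first, then for each extra covariate in the
-- fixed canonical order it asks whether this pheno is in that covariate's
-- needed-by index (objective: alternative decomposition, same cost).

-- ===== PORT A =====
-- module constant PC_COLS = [f"PC{i}" for i in range(1, 11)] (written out as its value)
def pcCols : List String :=
  ["PC1", "PC2", "PC3", "PC4", "PC5", "PC6", "PC7", "PC8", "PC9", "PC10"]

def get_covars (pheno : String) (available_cols : List String) : List String :=
  let covars := pcCols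
  let covars :=
    if pheno == "age" then covars ++ ["gender_num"]
    else if pheno == "BMI" then covars ++ ["gender_num"]
    else if pheno == "G19B" then covars ++ ["gender_num"]
    else if pheno == "log10eos" then covars ++ ["age", "gender_num"]
    else if pheno == "pctpred_fev1_pre_BD" then covars ++ ["gender_num", "smkexp_current"]
    else if ["Hospitalized_Asthma_Last_Yr", "G20D"].contains pheno then
      covars ++ ["age", "gender_num", "smkexp_current"]
    else if pheno == "smkexp_current" then covars ++ ["age", "gender_num"]
    else covars
  covars.filter (fun c => available_cols.contains c)

-- ===== PORT B =====
-- the module-level dict literal _NEEDED_BY (inverted index covariate → phenos)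
def neededBy : PySem.Dict String (List String) :=
  PySem.Dict.mk
    [ ("age", ["log10eos", "Hospitalized_Asthma_Last_Yr", "G20D", "smkexp_current"])
    , ("gender_num", ["age", "BMI", "G19B", "log10eos", "pctpred_fev1_pre_BD",
                      "Hospitalized_Asthma_Last_Yr", "G20D", "smkexp_current"])
    , ("smkexp_current", ["pctpred_fev1_pre_BD", "Hospitalized_Asthma_Last_Yr", "G20D"]) ]

def get_covars_alt (pheno : String) (available_cols : List String) : List String :=
  let out := pcCols.filter (fun pc => available_cols.contains pc)
  (["age", "gender_num", "smkexp_current"] : List String).foldl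
    (fun out cov =>
      if (neededBy.getD cov []).contains pheno && available_cols.contains cov then
        out ++ [cov]
      else out) out

-- ===== PRECONDITION & SPEC =====
def Spec_get_covars (pheno : String) (available_cols : List String) (out : List String) : Prop := out = get_covars_alt pheno available_cols
instance (pheno : String) (available_cols : List String) (out : List String) : Decidable (Spec_get_covars pheno available_cols out) := by unfold Spec_get_covars; infer_instance

-- ===== CLAIM (what is proved, stated in full; the proofs are below) =====
def Claim_equal_get_covars : Prop := ∀ (pheno : String) (available_cols : List String), Dom_get_covars pheno available_cols → Spec_get_covars pheno available_cols (get_covars pheno available_cols)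

-- ===== LEMMAS AND PROOFS =====

-- proof-side name for the three appended extras of B's fold
def extrasOf (pheno : String) (ac : List String) : List String :=
  (if (["log10eos", "Hospitalized_Asthma_Last_Yr", "G20D", "smkexp_current"] : List String).contains pheno && ac.contains "age" then ["age"] else [])
  ++ ((if (["age", "BMI", "G19B", "log10eos", "pctpred_fev1_pre_BD",
           "Hospitalized_Asthma_Last_Yr", "G20D", "smkexp_current"] : List String).contains pheno && ac.contains "gender_num" then ["gender_num"] else [])
  ++ (if (["pctpred_fev1_pre_BD", "Hospitalized_Asthma_Last_Yr", "G20D"] : List String).contains pheno && ac.contains "smkexp_current" then ["smkexp_current"] else []))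

theorem app_if (out : List String) (b : Bool) (x : String) :
    (if b = true then out ++ [x] else out) = out ++ (if b = true then [x] else []) := by
  cases b <;> simp

theorem lk_age : neededBy.getD "age" []
    = ["log10eos", "Hospitalized_Asthma_Last_Yr", "G20D", "smkexp_current"] := rfl

theorem lk_gender : neededBy.getD "gender_num" []
    = ["age", "BMI", "G19B", "log10eos", "pctpred_fev1_pre_BD",
       "Hospitalized_Asthma_Last_Yr", "G20D", "smkexp_current"] := rfl

theorem lk_smk : neededBy.getD "smkexp_current" []
    = ["pctpred_fev1_pre_BD", "Hospitalized_Asthma_Last_Yr", "G20D"] := rfl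

theorem B_shape (pheno : String) (ac : List String) :
    get_covars_alt pheno ac
    = pcCols.filter (fun c => ac.contains c) ++ extrasOf pheno ac := by
  unfold get_covars_alt extrasOf
  simp only [List.foldl, lk_age, lk_gender, lk_smk, app_if, List.append_assoc]
  split_ifs <;> simp

theorem get_covars_spec : Claim_equal_get_covars := by
  intro pheno ac _
  unfold Spec_get_covars
  rw [B_shape]
  unfold get_covars
  split_ifs with h1 h2 h3 h4 h5 h6 h7 <;>
    [skip; skip; skip; skip; skip;
     (simp only [List.contains_eq_mem, List.mem_cons, List.not_mem_nil, or_false,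
        decide_eq_true_eq] at h6; rcases h6 with h6 | h6); skip; skip] <;>
    first
    | (rw [beq_iff_eq] at *; subst_vars
       rw [List.filter_append]
       refine congrArg _ ?_
       simp only [extrasOf]
       norm_num [List.filter]
       split_ifs <;> simp_all)
    | skip
  -- default case: pheno matches none of the eight strings
  simp only [beq_iff_eq] at h1 h2 h3 h4 h5 h7
  simp only [List.contains_eq_mem, List.mem_cons, List.not_mem_nil, or_false,
    decide_eq_true_eq, not_or] at h6
  simp [extrasOf, h1, h2, h3, h4, h5, h6.1, h6.2, h7]
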